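-- pv_equiv track=rewrite | github.com/ChipFlow/context-daddy | scripts/context_saver.py | _read_sections
-- ===== SOURCE A (Python) =====
-- def _read_sections(text: str) -> dict[str, str]:
--     """Parse markdown into {heading: content} dict.
--
--     Only parses ## level headings. Content includes everything until the next
--     ## heading or end of file.
--     """
--     sections: dict[str, str] = {}
--     current_heading = "__preamble__"
--     current_lines: list[str] = []
--
--     for line in text.split("\n"):
--         if line.startswith("## "):
--             sections[current_heading] = "\n".join(current_lines)
--             current_heading = line[3:].strip()
--             current_lines = []
--         else:
--             current_lines.append(line)
--
--     sections[current_heading] = "\n".join(current_lines)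
--     return sections
-- ===== SOURCE B (Python) =====
-- def _read_sections(text: str) -> dict[str, str]:
--     """Parse markdown into {heading: content} dict (index-then-slice strategy)."""
--     lines = text.split("\n")
--     heads = [(i, l[3:].strip()) for i, l in enumerate(lines) if l.startswith("## ")]
--     sections: dict[str, str] = {}
--     prev_key, prev_start = "__preamble__", 0
--     for i, name in heads:
--         sections[prev_key] = "\n".join(lines[prev_start:i])
--         prev_key, prev_start = name, i + 1
--     sections[prev_key] = "\n".join(lines[prev_start:])
--     return sections
-- ===== Notes on version B (the rewrite author's own statement) =====
-- stated objective: alternative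
-- what changed: B first builds an index table of heading boundaries (enumerate+filter), then fills the dict by slicing the line list between consecutive boundaries, instead of A's single pass that flushes a running line buffer at each heading.
import Mathlib
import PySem

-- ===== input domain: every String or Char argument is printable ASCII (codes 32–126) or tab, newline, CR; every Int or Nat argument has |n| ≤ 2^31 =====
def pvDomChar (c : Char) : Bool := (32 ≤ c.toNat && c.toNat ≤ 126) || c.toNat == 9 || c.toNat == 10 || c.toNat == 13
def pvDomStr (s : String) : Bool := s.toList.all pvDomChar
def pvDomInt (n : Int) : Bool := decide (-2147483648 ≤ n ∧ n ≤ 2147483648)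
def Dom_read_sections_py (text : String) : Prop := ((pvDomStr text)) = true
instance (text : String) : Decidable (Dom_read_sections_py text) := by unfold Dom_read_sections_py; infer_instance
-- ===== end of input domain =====

-- B builds the heading-index table first and slices between boundaries; A flushes a running buffer. Same O(n) cost, different decomposition.

-- ===== PORT A =====
-- text.split("\n") (sep ≠ "", exact per PySem.Chars.splitOn)
def splitNL (s : String) : List String := (PySem.Chars.splitOn s.toList ['\n']).map String.ofList

def joinLines (ls : List String) : String := PySem.Str.join "\n" ls

-- loop body of A's single pass: state (sections, current_heading, current_lines)
def stepA (st : PySem.Dict String String × String × List String) (line : String) :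
    PySem.Dict String String × String × List String :=
  if PySem.Str.startswith line "## " then
    (st.1.insert st.2.1 (joinLines st.2.2), PySem.Str.strip (PySem.Str.slice line (some 3) none), ([] : List String))
  else
    (st.1, st.2.1, st.2.2 ++ [line])

def read_sections_py (text : String) : List (String × String) :=
  let st := (splitNL text).foldl stepA (PySem.Dict.empty, "__preamble__", ([] : List String))
  (st.1.insert st.2.1 (joinLines st.2.2)).items

-- ===== PORT B =====
-- comprehension body: keep (index, stripped name) for heading lines
def headOf (p : Int × String) : Option (Int × String) :=
  if PySem.Str.startswith p.2 "## " then
    some (p.1, PySem.Str.strip (PySem.Str.slice p.2 (some 3) none))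
  else none

-- loop body of B's boundary walk: state (sections, prev_key, prev_start)
def stepB (lines : List String) (st : PySem.Dict String String × String × Int) (hd : Int × String) :
    PySem.Dict String String × String × Int :=
  (st.1.insert st.2.1 (joinLines (PySem.List.slice lines (some st.2.2) (some hd.1))), hd.2, hd.1 + 1)

def read_sections_py_alt (text : String) : List (String × String) :=
  let lines := splitNL text
  let heads := (PySem.List.enumerate lines 0).filterMap headOf
  let st := heads.foldl (stepB lines) (PySem.Dict.empty, "__preamble__", (0 : Int))
  (st.1.insert st.2.1 (joinLines (PySem.List.slice lines (some st.2.2) none))).items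

-- ===== PRECONDITION & SPEC =====
def Spec_read_sections_py (text : String) (out : List (String × String)) : Prop := out = read_sections_py_alt text
instance (text : String) (out : List (String × String)) : Decidable (Spec_read_sections_py text out) := by unfold Spec_read_sections_py; infer_instance

-- ===== CLAIM (what is proved, stated in full; the proofs are below) =====
def Claim_equal_read_sections_py : Prop := ∀ (text : String), Dom_read_sections_py text → Spec_read_sections_py text (read_sections_py text)

-- ===== LEMMAS AND PROOFS =====

def finishA (st : PySem.Dict String String × String × List String) : List (String × String) :=
  (st.1.insert st.2.1 (joinLines st.2.2)).items

def finishB (lines : List String) (st : PySem.Dict String String × String × Int) : List (String × String) :=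
  (st.1.insert st.2.1 (joinLines (PySem.List.slice lines (some st.2.2) none))).items

theorem main_lemma (rest : List String) :
    ∀ (lines : List String) (j s : Nat) (d : PySem.Dict String String) (h : String),
      lines.drop j = rest → s ≤ j →
      finishA (rest.foldl stepA (d, h, (lines.take j).drop s))
        = finishB lines
            (((PySem.List.enumerate rest (j : Int)).filterMap headOf).foldl (stepB lines)
              (d, h, (s : Int))) := by
  induction rest with
  | nil =>
    intro lines j s d h hdrop _
    have hlen : lines.length ≤ j := List.drop_eq_nil_iff.mp hdrop
    rw [List.take_of_length_le hlen]
    simp [finishA, finishB, PySem.List.enumerate, PySem.List.slice_from_natCast]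
  | cons l rs ih =>
    intro lines j s d h hdrop hs
    have hjlt : j < lines.length := by
      by_contra hc
      rw [List.drop_eq_nil_iff.mpr (by omega)] at hdrop
      simp at hdrop
    have hget : lines[j]? = some l := by
      rw [← List.head?_drop, hdrop]; rfl
    have hdrop' : lines.drop (j + 1) = rs := by
      rw [← List.tail_drop, hdrop]; rfl
    have htake : lines.take (j + 1) = lines.take j ++ [l] := by
      rw [List.take_add_one, hget]; rfl
    have hcast : ((j + 1 : Nat) : Int) = (j : Int) + 1 := by push_cast; ring
    have henum : PySem.List.enumerate (l :: rs) (j : Int)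
        = ((j : Int), l) :: PySem.List.enumerate rs (((j + 1 : Nat) : Int)) := by
      rw [PySem.List.enumerate_cons, hcast]
    rw [henum, List.filterMap_cons, List.foldl_cons]
    by_cases hsw : PySem.Str.startswith l "## " = true
    · have hsw' : PySem.Chars.startswith l.toList ['#', '#', ' '] = true := by
        simpa using hsw
      have hhead : headOf ((j : Int), l)
          = some ((j : Int), PySem.Str.strip (PySem.Str.slice l (some 3) none)) := by
        simp [headOf, hsw']
      have hslice : PySem.List.slice lines (some (s : Int)) (some (j : Int))
          = (lines.take j).drop s := by
        have hj : s + (j - s) = j := by omega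
        rw [PySem.List.slice_natCast, List.take_drop, hj]
      have hstepA : stepA (d, h, (lines.take j).drop s) l
          = (d.insert h (joinLines ((lines.take j).drop s)),
             PySem.Str.strip (PySem.Str.slice l (some 3) none), ([] : List String)) := by
        simp [stepA, hsw']
      have hstepB : stepB lines (d, h, (s : Int))
            ((j : Int), PySem.Str.strip (PySem.Str.slice l (some 3) none))
          = (d.insert h (joinLines ((lines.take j).drop s)),
             PySem.Str.strip (PySem.Str.slice l (some 3) none), ((j + 1 : Nat) : Int)) := by
        simp only [stepB]
        rw [hslice, hcast]
      have hempty : (lines.take (j + 1)).drop (j + 1) = [] :=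
        List.drop_eq_nil_iff.mpr (by rw [List.length_take]; exact Nat.min_le_left _ _)
      rw [hhead, List.foldl_cons, hstepA, hstepB, ← hempty]
      exact ih lines (j + 1) (j + 1) _ _ hdrop' (Nat.le_refl _)
    · have hsw' : PySem.Chars.startswith l.toList ['#', '#', ' '] = false := by
        simpa using hsw
      have hhead : headOf ((j : Int), l) = none := by
        simp [headOf, hsw']
      have hcur : (List.take j lines).drop s ++ [l] = (List.take (j + 1) lines).drop s := by
        rw [htake, List.drop_append_of_le_length (by rw [List.length_take]; omega)]
      have hstepA : stepA (d, h, (lines.take j).drop s) l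
          = (d, h, (lines.take (j + 1)).drop s) := by
        simp [stepA, hsw', hcur]
      rw [hhead, hstepA]
      exact ih lines (j + 1) s d h hdrop' (by omega)

theorem read_sections_py_spec : Claim_equal_read_sections_py := by
  intro text _
  show read_sections_py text = read_sections_py_alt text
  have h := main_lemma (splitNL text) (splitNL text) 0 0 PySem.Dict.empty "__preamble__" rfl
    (Nat.le_refl 0)
  simpa [read_sections_py, read_sections_py_alt, finishA, finishB] using h
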